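-- pv_equiv track=rewrite | github.com/vulnz/dominator | detectors/base_detector.py | has_suspicious_words
-- ===== SOURCE A (Python) =====
-- def has_suspicious_words(text: str) -> bool:
--     """
--     Check if text contains words that indicate false positive
--
--     Args:
--         text: Text to check
--
--     Returns:
--         True if suspicious words found
--     """
--     suspicious = [
--         'example', 'sample', 'tutorial', 'documentation',
--         'demo', 'test case', 'illustration', '<code>',
--         'syntax:', 'usage:', 'example code'
--     ]
--
--     text_lower = text.lower()
--     return any(word in text_lower for word in suspicious)
-- ===== SOURCE B (Python) =====
-- def has_suspicious_words(text: str) -> bool: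
--     """
--     Check if text contains words that indicate false positive
--
--     Single position-major scan: walk the lowercased text once and at each
--     position test whether any suspicious word starts there (instead of one
--     full substring search per word as in the original).
--     """
--     suspicious = [
--         'example', 'sample', 'tutorial', 'documentation',
--         'demo', 'test case', 'illustration', '<code>',
--         'syntax:', 'usage:', 'example code'
--     ]
--
--     t = text.lower()
--     for i in range(len(t)):
--         for word in suspicious:
--             if t.startswith(word, i):
--                 return True
--     return False
-- ===== Notes on version B (the rewrite author's own statement) =====
-- stated objective: alternative
-- what changed: Replaced the pattern-major loop (one full 'word in text' substring search per suspicious word) by a single position-major scan of the lowercased text that tests at each index whether any suspicious word starts there.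
import Mathlib
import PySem

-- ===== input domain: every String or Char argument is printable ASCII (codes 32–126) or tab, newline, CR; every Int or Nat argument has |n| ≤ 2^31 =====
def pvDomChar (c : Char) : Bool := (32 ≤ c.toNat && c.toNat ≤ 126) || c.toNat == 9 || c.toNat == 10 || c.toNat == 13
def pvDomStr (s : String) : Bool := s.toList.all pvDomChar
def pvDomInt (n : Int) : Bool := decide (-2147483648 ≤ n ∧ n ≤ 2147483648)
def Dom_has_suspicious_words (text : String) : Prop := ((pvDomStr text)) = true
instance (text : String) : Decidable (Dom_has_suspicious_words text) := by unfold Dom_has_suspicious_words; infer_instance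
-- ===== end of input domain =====

-- B replaces A's per-word substring searches by one position-major scan of the lowercased text (alternative structure, no speed claim).

-- ===== PORT A =====
def pvSuspicious : List String :=
  ["example", "sample", "tutorial", "documentation",
   "demo", "test case", "illustration", "<code>",
   "syntax:", "usage:", "example code"]

def has_suspicious_words (text : String) : Bool :=
  let text_lower := PySem.Str.lower text
  pvSuspicious.any (fun word => PySem.Str.isIn word text_lower)

-- ===== PORT B =====
def pvSuspiciousAlt : List String :=
  ["example", "sample", "tutorial", "documentation",
   "demo", "test case", "illustration", "<code>",
   "syntax:", "usage:", "example code"]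

-- the position loop 'for i in range(len(t)): … t.startswith(word, i) …' as structural recursion over suffixes
def pvScan (words : List (List Char)) (s : List Char) : Bool :=
  match s with
  | [] => false
  | c :: rest => words.any (fun w => List.isPrefixOf w (c :: rest)) || pvScan words rest

def has_suspicious_words_alt (text : String) : Bool :=
  pvScan (pvSuspiciousAlt.map String.toList) (PySem.Str.lower text).toList

-- ===== PRECONDITION & SPEC =====
def Spec_has_suspicious_words (text : String) (out : Bool) : Prop := out = has_suspicious_words_alt text
instance (text : String) (out : Bool) : Decidable (Spec_has_suspicious_words text out) := by unfold Spec_has_suspicious_words; infer_instance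

-- ===== CLAIM (what is proved, stated in full; the proofs are below) =====
def Claim_equal_has_suspicious_words : Prop := ∀ (text : String), Dom_has_suspicious_words text → Spec_has_suspicious_words text (has_suspicious_words text)

-- ===== LEMMAS AND PROOFS =====

-- the position-major scan finds a word iff that word is an infix (given no word is empty)
lemma pvScan_iff (words : List (List Char)) (h : ∀ w ∈ words, w ≠ []) (s : List Char) :
    pvScan words s = true ↔ ∃ w ∈ words, w <:+: s := by
  induction s with
  | nil =>
    simp only [pvScan]
    constructor
    · intro hfalse; exact absurd hfalse (by simp)
    · rintro ⟨w, hw, hinf⟩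
      exact absurd (List.eq_nil_of_infix_nil hinf) (h w hw)
  | cons c rest ih =>
    simp only [pvScan, Bool.or_eq_true, List.any_eq_true, List.isPrefixOf_iff_prefix, ih,
      List.infix_cons_iff]
    constructor
    · rintro (⟨w, hw, hp⟩ | ⟨w, hw, hi⟩)
      · exact ⟨w, hw, Or.inl hp⟩
      · exact ⟨w, hw, Or.inr hi⟩
    · rintro ⟨w, hw, hp | hi⟩
      · exact Or.inl ⟨w, hw, hp⟩
      · exact Or.inr ⟨w, hw, hi⟩

-- ===== VERDICT (by name: the statement is the Claim_ definition above) =====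
theorem has_suspicious_words_spec : Claim_equal_has_suspicious_words := by
  intro text _
  unfold Spec_has_suspicious_words has_suspicious_words has_suspicious_words_alt
  rw [Bool.eq_iff_iff]
  rw [pvScan_iff _ (by decide)]
  simp only [List.any_eq_true, PySem.Str.isIn_iff_infix, List.mem_map]
  constructor
  · rintro ⟨w, hw, hinf⟩
    exact ⟨w.toList, ⟨w, hw, rfl⟩, hinf⟩
  · rintro ⟨_, ⟨w, hw, rfl⟩, hinf⟩
    exact ⟨w, hw, hinf⟩
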